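-- pv_equiv track=rewrite | github.com/OneKekBer/matura-z-informatyki | practise/neon-cyfrowy/4.py | get_next_alfabet_letter
-- ===== SOURCE A (Python) =====
-- def get_next_alfabet_letter(letter):
--    alfabet = "ABCDEFGHIJKLMNOPQRSTUVWXYZ"
--    letter.upper()
--    for i in range(0, len(alfabet)):
--       if(letter == alfabet[i]):
--          if(i == len(alfabet) - 1):
--             return "A"
--          return alfabet[i+1]
-- ===== SOURCE B (Python) =====
-- def get_next_alfabet_letter(letter):
--     letter.upper()
--     if len(letter) == 1 and 'A' <= letter <= 'Z':
--         return 'A' if letter == 'Z' else chr(ord(letter) + 1)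
-- ===== Notes on version B (the rewrite author's own statement) =====
-- stated objective: simpler
-- what changed: Replaces the 26-step scan of the alphabet string with a closed-form code-point range test and chr(ord(letter)+1), wrapping the last letter back to the first.
import Mathlib
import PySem

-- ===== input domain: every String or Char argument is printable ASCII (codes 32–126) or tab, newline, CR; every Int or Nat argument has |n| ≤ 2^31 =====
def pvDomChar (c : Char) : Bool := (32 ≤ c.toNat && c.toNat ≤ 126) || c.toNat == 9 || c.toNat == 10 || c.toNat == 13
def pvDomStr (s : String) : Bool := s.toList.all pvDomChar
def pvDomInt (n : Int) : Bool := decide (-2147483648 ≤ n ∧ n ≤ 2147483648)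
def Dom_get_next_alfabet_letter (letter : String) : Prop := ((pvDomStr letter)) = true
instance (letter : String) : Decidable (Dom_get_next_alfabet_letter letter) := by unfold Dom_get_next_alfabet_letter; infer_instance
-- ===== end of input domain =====

-- B replaces A's 26-step scan of the alphabet string with a closed-form code-point test (simpler).


set_option maxRecDepth 8000

-- ===== PORT A =====
def pvAlf : String := "ABCDEFGHIJKLMNOPQRSTUVWXYZ"

-- the 'for i in range(0, len(alfabet))' loop with its early returns, over the remaining
-- indices; 'ls' is letter's code points ('letter == alfabet[i]' compares them with the slice)
def pvLoopA (ls : List Char) : List Int → Option String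
  | [] => none
  | i :: rest =>
    match PySem.Str.pyGet? pvAlf i with
    | none => none  -- IndexError is unreachable: every i of the range is in bounds
    | some c =>
      if ls = [c] then
        if i = PySem.Str.len pvAlf - 1 then some "A"
        else
          match PySem.Str.pyGet? pvAlf (i + 1) with
          | none => none  -- unreachable for a matched non-last index
          | some c' => some (String.ofList [c'])
      else pvLoopA ls rest

def get_next_alfabet_letter (letter : String) : Option String :=
  -- 'letter.upper()' is evaluated and discarded; on a String argument it has no effect
  pvLoopA letter.toList (PySem.List.pyRange 0 (PySem.Str.len pvAlf) 1)

-- ===== PORT B =====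
def get_next_alfabet_letter_alt (letter : String) : Option String :=
  -- 'letter.upper()' discarded; len(letter) == 1 and 'A' <= letter <= 'Z' is, for a
  -- single character, exactly the code-point range test 65 ≤ c ≤ 90 (exact on ASCII)
  match letter.toList with
  | [c] =>
    if 65 ≤ c.toNat ∧ c.toNat ≤ 90 then
      if c.toNat = 90 then some "A" else some (String.ofList [Char.ofNat (c.toNat + 1)])
    else none
  | _ => none

-- ===== PRECONDITION & SPEC =====
def Spec_get_next_alfabet_letter (letter : String) (out : Option String) : Prop := out = get_next_alfabet_letter_alt letter
instance (letter : String) (out : Option String) : Decidable (Spec_get_next_alfabet_letter letter out) := by unfold Spec_get_next_alfabet_letter; infer_instance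

-- ===== CLAIM (what is proved, stated in full; the proofs are below) =====
def Claim_equal_get_next_alfabet_letter : Prop := ∀ (letter : String), Dom_get_next_alfabet_letter letter → Spec_get_next_alfabet_letter letter (get_next_alfabet_letter letter)

-- ===== LEMMAS AND PROOFS =====

-- if the letter never equals a one-char slice of the alphabet, the loop falls through to None
theorem pvLoopA_none (ls : List Char)
    (h : ∀ d ∈ pvAlf.toList, ls ≠ [d]) :
    ∀ l : List Int, pvLoopA ls l = none := by
  intro l
  induction l with
  | nil => rfl
  | cons i rest ih =>
    unfold pvLoopA
    cases hg : PySem.Str.pyGet? pvAlf i with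
    | none => rfl
    | some c =>
      have hc : c ∈ pvAlf.toList := by
        simp [PySem.Str.pyGet?] at hg
        exact PySem.List.mem_of_pyGet?_eq_some _ hg
      simp only [if_neg (h c hc)]
      exact ih

theorem pvAlf_list : pvAlf.toList = ['A','B','C','D','E','F','G','H','I','J','K','L','M','N','O','P','Q','R','S','T','U','V','W','X','Y','Z'] := by decide

theorem pvAlf_range : ∀ d ∈ pvAlf.toList, 65 ≤ d.toNat ∧ d.toNat ≤ 90 := by
  rw [pvAlf_list]
  intro d hd
  fin_cases hd <;> exact ⟨by decide, by decide⟩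

theorem pv_single (letter : String) (c : Char) (hl : letter.toList = [c])
    (h65 : 65 ≤ c.toNat) (h90 : c.toNat ≤ 90) :
    get_next_alfabet_letter letter = get_next_alfabet_letter_alt letter := by
  have hc : c = Char.ofNat c.toNat := (Char.ofNat_toNat c).symm
  rw [hc] at hl
  unfold get_next_alfabet_letter get_next_alfabet_letter_alt
  rw [hl]
  generalize c.toNat = n at h65 h90 ⊢
  interval_cases n <;> decide

-- ===== VERDICT (by name: the statement is the Claim_ definition above) =====
theorem get_next_alfabet_letter_spec : Claim_equal_get_next_alfabet_letter := by
  intro letter _hdom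
  unfold Spec_get_next_alfabet_letter
  match hl : letter.toList with
  | [c] =>
    by_cases hr : 65 ≤ c.toNat ∧ c.toNat ≤ 90
    · exact pv_single letter c hl hr.1 hr.2
    · have hA : get_next_alfabet_letter letter = none := by
        unfold get_next_alfabet_letter
        apply pvLoopA_none
        intro d hd he
        rw [hl] at he
        have hcd : c = d := by injection he
        subst hcd
        exact hr (pvAlf_range c hd)
      rw [hA]
      simp [get_next_alfabet_letter_alt, hl, hr]
  | [] =>
    have hA : get_next_alfabet_letter letter = none := by
      unfold get_next_alfabet_letter
      apply pvLoopA_none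
      intro d _ he
      rw [hl] at he
      simp at he
    rw [hA]
    simp [get_next_alfabet_letter_alt, hl]
  | c :: c' :: rest =>
    have hA : get_next_alfabet_letter letter = none := by
      unfold get_next_alfabet_letter
      apply pvLoopA_none
      intro d _ he
      rw [hl] at he
      have := congrArg List.length he
      simp at this
    rw [hA]
    simp [get_next_alfabet_letter_alt, hl]
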